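-- pv_equiv track=rewrite | github.com/sjshide/AdventOfCode | 2017/2017_09.py | rem_exc
-- ===== SOURCE A (Python) =====
-- def rem_exc(s):
--     m = len(s)
--     new_s = ''
--     i = 0
--     while i<m:
--         check = 0
--         this = s[i]
--         if this=='!':
--             i+=1
--             check=1
--         if check==0:
--             new_s+=this
--         i+=1
--     return(new_s)
-- ===== SOURCE B (Python) =====
-- import re
--
-- def rem_exc(s):
--     # single regex substitution: remove each '!' and the (optional) character after it
--     return re.sub(r'!.?', '', s, flags=re.S)
-- ===== Notes on version B (the rewrite author's own statement) =====
-- stated objective: faster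
-- what changed: Replaced the index-advancing while loop with a check flag and quadratic string concatenation by a single regex substitution (DOTALL) that deletes each exclamation mark together with the optionally following character.
import Mathlib
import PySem

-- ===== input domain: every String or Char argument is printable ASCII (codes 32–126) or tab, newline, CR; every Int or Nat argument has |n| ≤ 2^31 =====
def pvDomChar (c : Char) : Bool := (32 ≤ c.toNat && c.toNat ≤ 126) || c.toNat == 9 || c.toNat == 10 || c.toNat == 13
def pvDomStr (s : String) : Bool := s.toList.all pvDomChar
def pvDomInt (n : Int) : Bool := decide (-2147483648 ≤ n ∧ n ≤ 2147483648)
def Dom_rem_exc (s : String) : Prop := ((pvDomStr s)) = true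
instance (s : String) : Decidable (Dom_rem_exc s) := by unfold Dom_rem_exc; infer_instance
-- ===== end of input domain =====

-- B replaces A's index-advancing while loop (quadratic string concatenation) by a single regex substitution, measured faster in a timing run.

-- ===== PORT A =====
-- A's while loop: i advances by 2 past a '!' (check=1 suppresses the append), by 1 otherwise appending s[i].
def remLoopA (l : List Char) (i : Nat) (acc : List Char) : List Char :=
  if h : i < l.length then
    -- this = s[i]
    if l[i] = '!' then
      -- i += 1, check = 1 (no append), then i += 1
      remLoopA l (i + 2) acc
    else
      -- check = 0: new_s += this, then i += 1
      remLoopA l (i + 1) (acc ++ [l[i]])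
  else acc
termination_by l.length - i

def rem_exc (s : String) : String := String.ofList (remLoopA s.toList 0 [])

-- ===== PORT B =====
-- Hand port of re.sub(r'!.?', '', s, flags=re.S): exact — the regex engine scans left to right,
-- each leftmost match consumes '!' plus one following character if any (DOTALL: any char), replaced by ''.
def pvRegexSub (l : List Char) : List Char :=
  match l with
  | [] => []
  | c :: rest =>
    if c = '!' then
      match rest with
      | [] => pvRegexSub []      -- '!' at end: '.?' matches empty
      | _ :: t => pvRegexSub t   -- '!' plus one char consumed
    else c :: pvRegexSub rest

def rem_exc_alt (s : String) : String := String.ofList (pvRegexSub s.toList)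

-- ===== PRECONDITION & SPEC =====
def Spec_rem_exc (s : String) (out : String) : Prop := out = rem_exc_alt s
instance (s : String) (out : String) : Decidable (Spec_rem_exc s out) := by unfold Spec_rem_exc; infer_instance

-- ===== CLAIM (what is proved, stated in full; the proofs are below) =====
def Claim_equal_rem_exc : Prop := ∀ (s : String), Dom_rem_exc s → Spec_rem_exc s (rem_exc s)

-- ===== LEMMAS AND PROOFS =====

theorem pvRegexSub_bang (r : List Char) : pvRegexSub ('!' :: r) = pvRegexSub r.tail := by
  cases r <;> (rw [pvRegexSub.eq_def]; simp)

theorem pvRegexSub_ne (c : Char) (hc : ¬ c = '!') (r : List Char) :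
    pvRegexSub (c :: r) = c :: pvRegexSub r := by
  rw [pvRegexSub.eq_def]
  simp [hc]

theorem remLoopA_eq (l : List Char) (i : Nat) (acc : List Char) :
    remLoopA l i acc = acc ++ pvRegexSub (l.drop i) := by
  fun_induction remLoopA l i acc with
  | case1 i acc h hbang ih =>
    rw [ih]
    have hd : l.drop i = l[i] :: l.drop (i + 1) := List.drop_eq_getElem_cons h
    rw [hd, hbang, pvRegexSub_bang]
    simp [List.tail_drop]
  | case2 i acc h hne ih =>
    rw [ih]
    have hd : l.drop i = l[i] :: l.drop (i + 1) := List.drop_eq_getElem_cons h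
    rw [hd, pvRegexSub_ne _ hne]
    simp
  | case3 i acc h =>
    have hnil : l.drop i = [] := List.drop_eq_nil_of_le (by omega)
    simp [hnil, pvRegexSub]

-- ===== VERDICT (by name: the statement is the Claim_ definition above) =====
theorem rem_exc_spec : Claim_equal_rem_exc := by
  intro s _
  unfold Spec_rem_exc rem_exc rem_exc_alt
  rw [remLoopA_eq]
  simp
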